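-- pv_equiv track=rewrite | github.com/RevanVI/LineHelper | line_helper.py | RemovEmptyStrings
-- ===== SOURCE A (Python) =====
-- def RemovEmptyStrings(list_str):
--     i_max = len(list_str)
--     i_cur = 0
--     while i_cur < i_max:
--         if list_str[i_cur].strip(" \n\r\t") == "":
--             del list_str[i_cur]
--             i_max = i_max - 1
--         else:
--             i_cur = i_cur + 1
--     return list_str
-- ===== SOURCE B (Python) =====
-- def RemovEmptyStrings(list_str):
--     w = 0
--     for r in range(len(list_str)):
--         if list_str[r].strip(" \n\r\t") != "":
--             list_str[w] = list_str[r]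
--             w += 1
--     del list_str[w:]
--     return list_str
-- ===== Notes on version B (the rewrite author's own statement) =====
-- stated objective: alternative
-- what changed: Replaces A's while loop that deletes blank entries one at a time with del by a single-pass two-pointer in-place compaction that overwrites survivors toward the front and truncates the tail once.
import Mathlib
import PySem

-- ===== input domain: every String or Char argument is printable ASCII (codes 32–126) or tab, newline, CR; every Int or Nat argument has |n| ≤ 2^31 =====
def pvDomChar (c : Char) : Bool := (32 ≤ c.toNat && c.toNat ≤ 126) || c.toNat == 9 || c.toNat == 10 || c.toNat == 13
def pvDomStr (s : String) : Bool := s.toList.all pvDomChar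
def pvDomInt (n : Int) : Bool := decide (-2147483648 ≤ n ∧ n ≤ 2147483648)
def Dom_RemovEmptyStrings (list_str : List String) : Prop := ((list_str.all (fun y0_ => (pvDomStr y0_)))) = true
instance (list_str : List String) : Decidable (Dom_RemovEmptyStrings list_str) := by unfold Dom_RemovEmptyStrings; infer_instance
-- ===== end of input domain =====

-- B replaces A's delete-one-at-a-time while loop by a single-pass two-pointer in-place
-- compaction (overwrite survivors toward the front, truncate once); both mutate the
-- argument list in place in Python and the equivalence proved here is about the returned value.

-- ===== PORT A =====
-- A's while loop: at the current element, either delete it (recurse on the tail,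
-- i_max shrinking) or advance i_cur past it; indices only track the position, so the
-- loop is exactly this structural recursion.
def RemovEmptyStrings (list_str : List String) : List String :=
  match list_str with
  | [] => []
  | x :: xs =>
    if PySem.Str.stripChars x " \n\r\t" = "" then RemovEmptyStrings xs
    else x :: RemovEmptyStrings xs

-- ===== PORT B =====
-- loop body of Source B: read list_str[r] (always in range, so pyGetD with a dummy default
-- is exact), keep it by writing at the write index w and bumping w.
def pvStepB (st : List String × Nat) (r : Int) : List String × Nat :=
  let x := PySem.List.pyGetD st.1 r ""
  if PySem.Str.stripChars x " \n\r\t" ≠ "" then (st.1.set st.2 x, st.2 + 1) else st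

def RemovEmptyStrings_alt (list_str : List String) : List String :=
  let st := (PySem.List.pyRange 0 (list_str.length : Int) 1).foldl pvStepB (list_str, 0)
  st.1.take st.2   -- del list_str[w:]

-- ===== PRECONDITION & SPEC =====
def Spec_RemovEmptyStrings (list_str : List String) (out : List String) : Prop := out = RemovEmptyStrings_alt list_str
instance (list_str : List String) (out : List String) : Decidable (Spec_RemovEmptyStrings list_str out) := by unfold Spec_RemovEmptyStrings; infer_instance

-- ===== CLAIM (what is proved, stated in full; the proofs are below) =====
def Claim_equal_RemovEmptyStrings : Prop := ∀ (list_str : List String), Dom_RemovEmptyStrings list_str → Spec_RemovEmptyStrings list_str (RemovEmptyStrings list_str)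

-- ===== LEMMAS AND PROOFS =====

def pvKeep (s : String) : Bool := PySem.Str.stripChars s " \n\r\t" != ""

-- proof-side name for B's fold-then-truncate, with the foldl written out
def pvRun (arr : List String) (w : Nat) (a b : Int) : List String :=
  List.take ((PySem.List.pyRange a b 1).foldl pvStepB (arr, w)).2
    ((PySem.List.pyRange a b 1).foldl pvStepB (arr, w)).1

theorem portA_eq_filter (l : List String) :
    RemovEmptyStrings l = l.filter pvKeep := by
  induction l with
  | nil => rfl
  | cons x xs ih =>
    by_cases h : PySem.Str.stripChars x " \n\r\t" = "" <;>
      simp [RemovEmptyStrings, pvKeep, h, ih]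

theorem foldB_inv (rest : List String) : ∀ (kept junk : List String) (a : Nat),
    a = kept.length + junk.length →
    pvRun (kept ++ junk ++ rest) kept.length (a : Int) ((a : Int) + (rest.length : Int))
      = kept ++ rest.filter pvKeep := by
  induction rest with
  | nil =>
    intro kept junk a ha
    unfold pvRun
    rw [show ((([] : List String).length : Int)) = 0 from rfl, add_zero]
    rw [PySem.List.pyRange_one_eq_nil (le_refl _)]
    simp
  | cons x rest ih =>
    intro kept junk a ha
    unfold pvRun
    rw [List.length_cons]
    push_cast
    rw [PySem.List.pyRange_one_cons (by omega)]
    rw [List.foldl_cons]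
    have hget : ((kept ++ junk) ++ (x :: rest)).getD a "" = x := by
      subst ha
      rw [List.getD, List.getElem?_append_right (by simp)]
      simp
    by_cases hp : PySem.Str.stripChars x " \n\r\t" = ""
    · -- blank: state unchanged
      have hstep : pvStepB (kept ++ junk ++ (x :: rest), kept.length) (a : Int)
          = (kept ++ junk ++ (x :: rest), kept.length) := by
        simp only [pvStepB, PySem.List.pyGetD_natCast]
        rw [hget]
        simp [hp]
      rw [hstep]
      rw [show ((a : Int) + ((rest.length : Int) + 1)) = (((a + 1 : Nat) : Int) + (rest.length : Int)) by push_cast; ring]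
      rw [show ((a : Int) + 1) = (((a + 1 : Nat)) : Int) by push_cast; ring]
      rw [show kept ++ junk ++ (x :: rest) = kept ++ (junk ++ [x]) ++ rest by simp]
      have h := ih kept (junk ++ [x]) (a + 1) (by subst ha; simp; omega)
      unfold pvRun at h
      rw [h]
      simp [pvKeep, hp]
    · -- kept: write x at the write index
      have hstep : pvStepB (kept ++ junk ++ (x :: rest), kept.length) (a : Int)
          = ((kept ++ junk ++ (x :: rest)).set kept.length x, kept.length + 1) := by
        simp only [pvStepB, PySem.List.pyGetD_natCast]
        rw [hget]
        simp [hp]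
      rw [hstep]
      have hset : (kept ++ junk ++ (x :: rest)).set kept.length x
          = (kept ++ [x]) ++ ((junk ++ [x]).drop 1) ++ rest := by
        cases junk with
        | nil => simp
        | cons j js =>
          rw [show kept ++ (j :: js) ++ (x :: rest) = (kept ++ (j :: js)) ++ (x :: rest) by simp]
          rw [List.set_append, List.set_append]
          simp
      rw [hset]
      rw [show ((a : Int) + ((rest.length : Int) + 1)) = (((a + 1 : Nat) : Int) + (rest.length : Int)) by push_cast; ring]
      rw [show ((a : Int) + 1) = (((a + 1 : Nat)) : Int) by push_cast; ring]
      rw [show kept.length + 1 = (kept ++ [x]).length by simp]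
      have h := ih (kept ++ [x]) ((junk ++ [x]).drop 1) (a + 1)
        (by subst ha; cases junk <;> simp <;> try omega)
      unfold pvRun at h
      rw [h]
      simp [pvKeep, hp]

-- ===== VERDICT (by name: the statement is the Claim_ definition above) =====
theorem RemovEmptyStrings_spec : Claim_equal_RemovEmptyStrings := by
  intro l _
  show RemovEmptyStrings l = RemovEmptyStrings_alt l
  rw [portA_eq_filter]
  have h := foldB_inv l [] [] 0 rfl
  simp only [List.nil_append, Nat.cast_zero, zero_add] at h
  exact h.symm
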